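-- pv_equiv track=rewrite | github.com/HaShira-Lab/torah-phonetic-architecture | src/analyses/layer_a/Control/layer_a_consonant_equivalence.py | tokenize_word
-- ===== SOURCE A (Python) =====
-- from typing import List, Tuple
--
-- DIGRAPHS = ("sh", "kh", "ts")
--
-- def tokenize_word(word: str) -> List[str]:
--     """Tokenize a transliterated token into phonetic atoms, keeping sh/kh/ts atomic."""
--     out = []
--     i = 0
--     while i < len(word):
--         two = word[i:i + 2]
--         if two in DIGRAPHS:
--             out.append(two)
--             i += 2
--         else:
--             out.append(word[i])
--             i += 1
--     return out
-- ===== SOURCE B (Python) =====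
-- DIGRAPHS = ("sh", "kh", "ts")
--
-- def tokenize_word(word):
--     """Single left-to-right fold over characters: emit each char as its own
--     token, but merge it into the previous token when the pair forms a digraph."""
--     out = []
--     for c in word:
--         if out and out[-1] + c in DIGRAPHS:
--             out[-1] += c
--         else:
--             out.append(c)
--     return out
-- ===== Notes on version B (the rewrite author's own statement) =====
-- stated objective: faster
-- what changed: Replaces the index-based while loop with two-char lookahead slicing by a single left fold over characters that merges the current char into the previous single-char token when the pair forms a digraph; avoiding the per-position word[i:i+2] slice allocation gives a measured constant-factor speedup.
import Mathlib
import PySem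

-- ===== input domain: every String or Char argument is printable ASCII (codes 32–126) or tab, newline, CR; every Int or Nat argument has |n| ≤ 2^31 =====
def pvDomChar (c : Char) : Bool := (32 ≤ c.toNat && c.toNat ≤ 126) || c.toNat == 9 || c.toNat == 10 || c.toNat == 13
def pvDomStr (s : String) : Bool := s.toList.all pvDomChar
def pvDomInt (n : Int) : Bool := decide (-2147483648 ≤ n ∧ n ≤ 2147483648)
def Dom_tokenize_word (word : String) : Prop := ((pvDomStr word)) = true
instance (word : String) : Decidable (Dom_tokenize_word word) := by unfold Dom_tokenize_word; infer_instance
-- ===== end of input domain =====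

-- B replaces A's index loop with two-char lookahead slicing by a single left fold over
-- characters that merges the current char into the previous single-char token when the
-- pair is a digraph (objective: alternative decomposition, same O(n) cost).
-- Both ports work over List Char (tokens as char lists, DIGRAPHS as char-list pairs,
-- exact for "sh"/"kh"/"ts") and map String.ofList over the result at the end.

-- ===== PORT A =====
-- DIGRAPHS = ("sh", "kh", "ts")
def pvDigraphs : List (List Char) := [['s','h'], ['k','h'], ['t','s']]

-- the while loop: two = word[i:i+2]; the [c] case is i = len-1, where the slice has length 1
def tokenize_word_go : List Char → List (List Char)
  | [] => []
  | [c] => [[c]]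
  | c1 :: c2 :: rest =>
    if [c1, c2] ∈ pvDigraphs then [c1, c2] :: tokenize_word_go rest
    else [c1] :: tokenize_word_go (c2 :: rest)

def tokenize_word (word : String) : List String :=
  (tokenize_word_go word.toList).map String.ofList

-- ===== PORT B =====
-- one fold step: Python's `if out and out[-1] + c in DIGRAPHS: out[-1] += c else: out.append(c)`,
-- with `out` kept in reverse so out[-1] is the head
def tokenize_word_alt_step (out : List (List Char)) (c : Char) : List (List Char) :=
  match out with
  | last :: rest => if last ++ [c] ∈ pvDigraphs then (last ++ [c]) :: rest else [c] :: last :: rest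
  | [] => [[c]]

def tokenize_word_alt (word : String) : List String :=
  ((word.toList.foldl tokenize_word_alt_step []).reverse).map String.ofList

-- ===== PRECONDITION & SPEC =====
def Spec_tokenize_word (word : String) (out : List String) : Prop := out = tokenize_word_alt word
instance (word : String) (out : List String) : Decidable (Spec_tokenize_word word out) := by unfold Spec_tokenize_word; infer_instance

-- ===== CLAIM (what is proved, stated in full; the proofs are below) =====
def Claim_equal_tokenize_word : Prop := ∀ (word : String), Dom_tokenize_word word → Spec_tokenize_word word (tokenize_word word)

-- ===== LEMMAS AND PROOFS =====

-- the fold's accumulator head (last emitted token) cannot merge with the next char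
def pvNoMerge (acc : List (List Char)) (cs : List Char) : Prop :=
  match acc, cs with
  | a :: _, c :: _ => a ++ [c] ∉ pvDigraphs
  | _, _ => True

lemma pvNoMerge_two (a b : Char) (acc : List (List Char)) (cs : List Char) :
    pvNoMerge ([a, b] :: acc) cs := by
  cases cs with
  | nil => trivial
  | cons x xs => simp [pvNoMerge, pvDigraphs]

lemma pvStep_safe (acc : List (List Char)) (c : Char) (cs : List Char)
    (h : pvNoMerge acc (c :: cs)) :
    tokenize_word_alt_step acc c = [c] :: acc := by
  cases acc with
  | nil => rfl
  | cons a rest =>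
    simp only [pvNoMerge] at h
    simp [tokenize_word_alt_step, h]

lemma pvFold_go (cs : List Char) : ∀ (acc : List (List Char)), pvNoMerge acc cs →
    (cs.foldl tokenize_word_alt_step acc).reverse = acc.reverse ++ tokenize_word_go cs := by
  induction cs using tokenize_word_go.induct with
  | case1 => intro acc _; simp [tokenize_word_go]
  | case2 c =>
    intro acc h
    simp [List.foldl, pvStep_safe acc c [] h, tokenize_word_go]
  | case3 c1 c2 rest hdig ih =>
    intro acc h
    have h1 : tokenize_word_alt_step acc c1 = [c1] :: acc := pvStep_safe acc c1 (c2 :: rest) h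
    have h2 : tokenize_word_alt_step ([c1] :: acc) c2 = [c1, c2] :: acc := by
      simp [tokenize_word_alt_step, hdig]
    rw [List.foldl_cons, h1, List.foldl_cons, h2, ih ([c1, c2] :: acc) (pvNoMerge_two c1 c2 acc rest)]
    simp [tokenize_word_go, hdig]
  | case4 c1 c2 rest hdig ih =>
    intro acc h
    have h1 : tokenize_word_alt_step acc c1 = [c1] :: acc := pvStep_safe acc c1 (c2 :: rest) h
    have hnm : pvNoMerge ([c1] :: acc) (c2 :: rest) := by
      simp only [pvNoMerge, List.singleton_append]
      exact hdig
    rw [List.foldl_cons, h1, ih ([c1] :: acc) hnm]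
    simp [tokenize_word_go, hdig]

-- ===== VERDICT (by name: the statement is the Claim_ definition above) =====
theorem tokenize_word_spec : Claim_equal_tokenize_word := by
  intro word _
  unfold Spec_tokenize_word tokenize_word tokenize_word_alt
  rw [pvFold_go word.toList [] trivial]
  simp
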